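-- pv_equiv track=rewrite | github.com/FL-Penly/slack-coder | modules/im/slack.py | _get_default_opencode_agent_name
-- ===== SOURCE A (Python) =====
-- from typing import Dict, Any, Optional, Callable, List
--
-- def _get_default_opencode_agent_name(opencode_agents: list) -> Optional[str]:
--     """Resolve the default OpenCode agent name."""
--     for agent in opencode_agents:
--         name = agent.get("name")
--         if name == "build":
--             return name
--     for agent in opencode_agents:
--         name = agent.get("name")
--         if name:
--             return name
--     return None
-- ===== SOURCE B (Python) =====
-- from typing import Optional
--
-- def _get_default_opencode_agent_name(opencode_agents: list) -> Optional[str]: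
--     """Resolve the default OpenCode agent name (single pass)."""
--     first_named = None
--     for agent in opencode_agents:
--         name = agent.get("name")
--         if name == "build":
--             return name
--         if first_named is None and name:
--             first_named = name
--     return first_named
-- ===== Notes on version B (the rewrite author's own statement) =====
-- stated objective: simpler
-- what changed: Replaces A's two sequential scans with one traversal that short-circuits on 'build' and carries a first-truthy-name accumulator for the fallback.
import Mathlib
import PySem

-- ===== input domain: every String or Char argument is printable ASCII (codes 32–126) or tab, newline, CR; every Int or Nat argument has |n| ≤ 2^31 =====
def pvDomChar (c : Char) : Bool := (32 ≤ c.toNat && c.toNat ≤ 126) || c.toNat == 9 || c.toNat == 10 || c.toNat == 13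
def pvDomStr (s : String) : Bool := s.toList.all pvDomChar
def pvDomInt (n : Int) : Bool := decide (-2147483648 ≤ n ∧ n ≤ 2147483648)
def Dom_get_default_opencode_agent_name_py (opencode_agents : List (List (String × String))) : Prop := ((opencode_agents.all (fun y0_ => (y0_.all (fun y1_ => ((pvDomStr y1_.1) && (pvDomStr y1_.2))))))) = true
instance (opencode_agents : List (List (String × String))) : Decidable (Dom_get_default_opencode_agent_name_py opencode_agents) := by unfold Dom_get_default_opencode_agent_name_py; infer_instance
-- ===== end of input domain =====

-- B replaces A's two sequential scans with one pass carrying a first-truthy-name accumulator (simpler).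

-- ===== PORT A =====
-- first loop of A: return name if name == "build"
def pvA_loop1 : List (List (String × String)) → Option String
  | [] => none
  | agent :: rest =>
    let name := PySem.Dict.get? (PySem.Dict.mk agent) "name"
    if name = some "build" then name else pvA_loop1 rest

-- second loop of A: return name if name is truthy
def pvA_loop2 : List (List (String × String)) → Option String
  | [] => none
  | agent :: rest =>
    let name := PySem.Dict.get? (PySem.Dict.mk agent) "name"
    if name ≠ none ∧ name ≠ some "" then name else pvA_loop2 rest

def get_default_opencode_agent_name_py (opencode_agents : List (List (String × String))) : Option String :=
  match pvA_loop1 opencode_agents with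
  | some n => some n
  | none => pvA_loop2 opencode_agents

-- ===== PORT B =====
-- single loop of B with the accumulator first_named
def pvB_loop (first_named : Option String) : List (List (String × String)) → Option String
  | [] => first_named
  | agent :: rest =>
    let name := PySem.Dict.get? (PySem.Dict.mk agent) "name"
    if name = some "build" then name
    else if first_named = none ∧ name ≠ none ∧ name ≠ some "" then pvB_loop name rest
    else pvB_loop first_named rest

def get_default_opencode_agent_name_py_alt (opencode_agents : List (List (String × String))) : Option String :=
  pvB_loop none opencode_agents

-- ===== PRECONDITION & SPEC =====
def Spec_get_default_opencode_agent_name_py (opencode_agents : List (List (String × String))) (out : Option String) : Prop := out = get_default_opencode_agent_name_py_alt opencode_agents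
instance (opencode_agents : List (List (String × String))) (out : Option String) : Decidable (Spec_get_default_opencode_agent_name_py opencode_agents out) := by unfold Spec_get_default_opencode_agent_name_py; infer_instance

-- ===== CLAIM (what is proved, stated in full; the proofs are below) =====
def Claim_equal_get_default_opencode_agent_name_py : Prop := ∀ (opencode_agents : List (List (String × String))), Dom_get_default_opencode_agent_name_py opencode_agents → Spec_get_default_opencode_agent_name_py opencode_agents (get_default_opencode_agent_name_py opencode_agents)

-- ===== LEMMAS AND PROOFS =====
-- The single pass equals: loop1's result if any, else the accumulator if set, else loop2's result.
theorem pvB_loop_eq (agents : List (List (String × String))) (acc : Option String) :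
    pvB_loop acc agents =
      match pvA_loop1 agents with
      | some n => some n
      | none => match acc with
                | some s => some s
                | none => pvA_loop2 agents := by
  induction agents generalizing acc with
  | nil => cases acc <;> simp [pvB_loop, pvA_loop1, pvA_loop2]
  | cons agent rest ih =>
    simp only [pvB_loop, pvA_loop1, pvA_loop2]
    by_cases hb : PySem.Dict.get? (PySem.Dict.mk agent) "name" = some "build"
    · simp [hb]
    · by_cases ht : PySem.Dict.get? (PySem.Dict.mk agent) "name" ≠ none ∧ PySem.Dict.get? (PySem.Dict.mk agent) "name" ≠ some ""
      · cases acc with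
        | none =>
          obtain ⟨h1, h2⟩ := ht
          cases hn : PySem.Dict.get? (PySem.Dict.mk agent) "name" with
          | none => exact absurd hn h1
          | some s =>
            rw [hn] at hb h2
            simp [hb, h1, h2, hn, ih]
        | some s => simp [hb, ht, ih]
      · cases acc <;> simp [hb, ht, ih]

-- ===== VERDICT (by name: the statement is the Claim_ definition above) =====
theorem get_default_opencode_agent_name_py_spec : Claim_equal_get_default_opencode_agent_name_py := by
  intro agents _
  unfold Spec_get_default_opencode_agent_name_py get_default_opencode_agent_name_py get_default_opencode_agent_name_py_alt
  rw [pvB_loop_eq]
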